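-- pv_equiv track=rewrite | github.com/pangeorg/aoc | 2025/python/day02.py | is_invalid_2
-- ===== SOURCE A (Python) =====
-- def is_invalid_2(num: int):
--     num_str = str(num)
--     n = len(num_str)
--     window_size = n // 2
--     while window_size > 0:
--         left = 0
--         right = left + window_size
--         pattern = num_str[left:right]
--         invalid = True
--         while right < n:
--             left = right
--             right = left + window_size
--             if pattern != num_str[left:right]:
--                 invalid = False
--         if invalid:
--             return invalid
--         window_size -= 1
--     return False
-- ===== SOURCE B (Python) =====
-- def is_invalid_2(num: int):
--     s = str(num)
--     return s in (s + s)[1:-1]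
-- ===== Notes on version B (the rewrite author's own statement) =====
-- stated objective: idiomatic
-- what changed: Replaced the nested window-size/chunk-comparison loops by the classic repeated-substring-pattern idiom: s is a repetition of a smaller block iff s occurs in (s+s)[1:-1]; no explicit loop remains in B.
import Mathlib
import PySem

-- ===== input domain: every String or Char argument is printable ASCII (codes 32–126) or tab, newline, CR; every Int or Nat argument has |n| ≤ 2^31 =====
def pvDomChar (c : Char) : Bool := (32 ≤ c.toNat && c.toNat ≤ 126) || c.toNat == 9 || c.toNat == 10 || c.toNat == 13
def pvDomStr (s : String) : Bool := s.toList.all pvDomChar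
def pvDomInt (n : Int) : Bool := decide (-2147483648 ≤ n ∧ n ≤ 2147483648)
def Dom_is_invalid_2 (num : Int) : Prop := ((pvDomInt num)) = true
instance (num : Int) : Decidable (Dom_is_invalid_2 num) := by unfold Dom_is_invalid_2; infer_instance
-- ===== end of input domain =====

-- B replaces A's nested window-size/chunk loops by the classic repeated-substring idiom
-- s in (s+s)[1:-1]; same return value everywhere (idiomatic objective, no speed claim).

-- ===== PORT A =====
-- inner 'while right < n' loop of A: state (right, invalid); 'left' is always the previous right
def innerA (s : List Char) (n ws : Int) (pattern : List Char) (right : Int) (invalid : Bool)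
    (hws : 0 < ws) : Bool :=
  if _h : right < n then
    let left := right
    let right' := left + ws
    let invalid' := if pattern ≠ PySem.List.slice s (some left) (some right') then false else invalid
    innerA s n ws pattern right' invalid' hws
  else invalid
termination_by (n - right).toNat
decreasing_by omega

-- outer 'while window_size > 0' loop of A
def outerA (s : List Char) (n : Int) (ws : Int) : Bool :=
  if h : ws > 0 then
    let pattern := PySem.List.slice s (some 0) (some ws)
    let invalid := innerA s n ws pattern (0 + ws) true h
    if invalid then invalid else outerA s n (ws - 1)
  else false
termination_by ws.toNat
decreasing_by omega

def is_invalid_2 (num : Int) : Bool :=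
  let num_str := PySem.Int.toChars num
  let n : Int := num_str.length
  outerA num_str n (PySem.Int.floordiv n 2)

-- ===== PORT B =====
def is_invalid_2_alt (num : Int) : Bool :=
  let s := PySem.Int.toChars num
  PySem.Chars.isIn s (PySem.List.slice (s ++ s) (some 1) (some (-1)))

-- ===== PRECONDITION & SPEC =====
def Spec_is_invalid_2 (num : Int) (out : Bool) : Prop := out = is_invalid_2_alt num
instance (num : Int) (out : Bool) : Decidable (Spec_is_invalid_2 num out) := by unfold Spec_is_invalid_2; infer_instance

-- ===== CLAIM (what is proved, stated in full; the proofs are below) =====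
def Claim_equal_is_invalid_2 : Prop := ∀ (num : Int), Dom_is_invalid_2 num → Spec_is_invalid_2 num (is_invalid_2 num)

-- ===== LEMMAS AND PROOFS =====

lemma toDigitsCore_len_ge (b : Nat) :
    ∀ (f n : Nat) (l : List Char), l.length ≤ (Nat.toDigitsCore b f n l).length := by
  intro f
  induction f with
  | zero => intro n l; simp [Nat.toDigitsCore]
  | succ f ih =>
    intro n l
    simp only [Nat.toDigitsCore]
    split
    · simp
    · have := ih (n / b) (Nat.digitChar (n % b) :: l)
      simp at this ⊢
      omega

lemma toDigits_length_pos (b n : Nat) : 0 < (Nat.toDigits b n).length := by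
  show 0 < (Nat.toDigitsCore b (n + 1) n []).length
  simp only [Nat.toDigitsCore]
  split
  · simp
  · have := toDigitsCore_len_ge b n (n / b) [Nat.digitChar (n % b)]
    simp at this
    omega

-- str(num) is never the empty string
lemma toChars_ne_nil (num : Int) : PySem.Int.toChars num ≠ [] := by
  unfold PySem.Int.toChars
  split
  · simp
  · exact List.length_pos_iff.mp (toDigits_length_pos 10 num.toNat)

-- pointwise period w on s
def Per (s : List Char) (w : Nat) : Prop :=
  ∀ i : Nat, (h : i + w < s.length) → s[i]'(by omega) = s[i + w]'h

-- all size-w chunks of s agree with the first one (what A's inner loop checks, Nat level)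
def AWin (s : List Char) (w : Nat) : Prop :=
  0 < w ∧ ∀ m : Nat, m * w < s.length → (s.drop (m * w)).take w = s.take w

-- characterisation of A's inner loop
lemma innerA_iff (s : List Char) (n ws : Int) (pat : List Char) (right : Int) (inv : Bool)
    (hws : 0 < ws) :
    innerA s n ws pat right inv hws = true ↔
      (inv = true ∧ ∀ m : Nat, right + m * ws < n →
        pat = PySem.List.slice s (some (right + m * ws)) (some (right + m * ws + ws))) := by
  fun_induction innerA s n ws pat right inv hws with
  | case1 right inv _h left right' invalid' ih1 =>
    simp only [left, right', invalid'] at ih1 ⊢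
    rw [ih1]
    by_cases hpat : pat = PySem.List.slice s (some right) (some (right + ws))
    · rw [dif_neg (not_not_intro hpat)]
      constructor
      · rintro ⟨hi, hall⟩
        refine ⟨hi, ?_⟩
        intro m hm
        match m with
        | 0 => simpa using hpat
        | Nat.succ k =>
          have e : right + ((k + 1 : Nat) : Int) * ws = (right + ws) + (k : Int) * ws := by
            push_cast; ring
          rw [e] at hm ⊢
          exact hall k hm
      · rintro ⟨hi, hall⟩
        refine ⟨hi, ?_⟩
        intro m hm
        have e : (right + ws) + (m : Int) * ws = right + ((m + 1 : Nat) : Int) * ws := by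
          push_cast; ring
        rw [e] at hm ⊢
        exact hall (m + 1) hm
    · rw [dif_pos hpat]
      simp only [Bool.false_eq_true, false_and, false_iff]
      rintro ⟨hi, hall⟩
      exact hpat (by simpa using hall 0 (by simpa using _h))
  | case2 right inv _h =>
    constructor
    · intro hi
      refine ⟨hi, fun m hm => absurd hm ?_⟩
      have h0 : (0:Int) ≤ (m : Int) * ws := mul_nonneg (by positivity) hws.le
      intro hc; linarith
    · exact fun h => h.1

-- characterisation of A's outer loop: some window size w ∈ [1, ws] makes all chunks equal
lemma outerA_iff (s : List Char) (ws : Int) :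
    outerA s (s.length : Int) ws = true ↔
      ∃ w : Int, 1 ≤ w ∧ w ≤ ws ∧ ∀ m : Nat,
        (m : Int) * w < (s.length : Int) →
          PySem.List.slice s (some 0) (some w)
            = PySem.List.slice s (some ((m : Int) * w)) (some ((m : Int) * w + w)) := by
  fun_induction outerA s (s.length : Int) ws with
  | case1 ws hws pattern invalid hinv =>
    simp only [pattern, invalid] at hinv ⊢
    rw [hinv]
    simp only [true_iff]
    obtain ⟨-, hall⟩ := (innerA_iff s (s.length : Int) ws
      (PySem.List.slice s (some 0) (some ws)) (0 + ws) true hws).mp hinv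
    refine ⟨ws, by omega, le_refl ws, ?_⟩
    intro m hm
    match m with
    | 0 => simp
    | Nat.succ k =>
      have e : ((k + 1 : Nat) : Int) * ws = (0 + ws) + (k : Int) * ws := by push_cast; ring
      rw [e] at hm ⊢
      exact hall k hm
  | case2 ws hws pattern invalid hinv ih1 =>
    simp only [pattern, invalid] at hinv ⊢
    rw [ih1]
    constructor
    · rintro ⟨w, h1, h2, h3⟩
      exact ⟨w, h1, by omega, h3⟩
    · rintro ⟨w, h1, h2, h3⟩
      refine ⟨w, h1, ?_, h3⟩
      by_contra hgt
      rw [not_le] at hgt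
      have hw : w = ws := by omega
      subst hw
      apply hinv
      rw [innerA_iff]
      refine ⟨rfl, ?_⟩
      intro m hm
      have e : (0 + w) + (m : Int) * w = ((m + 1 : Nat) : Int) * w := by push_cast; ring
      rw [e] at hm ⊢
      exact h3 (m + 1) hm
  | case3 ws hws =>
    simp only [Bool.false_eq_true, false_iff]
    rintro ⟨w, h1, h2, -⟩
    omega

-- the Int-level chunk condition of outerA_iff at a Nat window size is AWin's condition
lemma chunk_nat (s : List Char) (w : Nat) :
    (∀ m : Nat, (m : Int) * (w : Int) < (s.length : Int) →
        PySem.List.slice s (some 0) (some (w : Int))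
          = PySem.List.slice s (some ((m : Int) * (w : Int))) (some ((m : Int) * (w : Int) + (w : Int))))
      ↔ ∀ m : Nat, m * w < s.length → (s.drop (m * w)).take w = s.take w := by
  have hs0 : PySem.List.slice s (some (0:Int)) (some (w : Int)) = s.take w := by
    rw [show (0 : Int) = ((0 : Nat) : Int) from rfl, PySem.List.slice_natCast]
    simp
  have hsm : ∀ m : Nat, PySem.List.slice s (some ((m : Int) * w)) (some ((m : Int) * w + w))
      = (s.drop (m * w)).take w := by
    intro m
    have h1 : ((m : Int) * w) = ((m * w : Nat) : Int) := by push_cast; ring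
    have h2 : ((m : Int) * w + w) = ((m * w + w : Nat) : Int) := by push_cast; ring
    rw [h2, h1, PySem.List.slice_natCast]
    congr 1
    omega
  constructor
  · intro h m hm
    have h' := h m (by exact_mod_cast hm)
    rw [hs0, hsm] at h'
    exact h'.symm
  · intro h m hm
    rw [hs0, hsm]
    exact (h m (by exact_mod_cast hm)).symm

lemma per_iterate (s : List Char) (w : Nat) (hp : Per s w) :
    ∀ m i : Nat, (h : i + m * w < s.length) → s[i]'(by omega) = s[i + m * w]'h := by
  intro m
  induction m with
  | zero => intro i h; simp
  | succ m ih =>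
    intro i h
    have e : (m + 1) * w = m * w + w := by ring
    have h1 : i + m * w < s.length := by omega
    have e2 : i + (m + 1) * w = i + m * w + w := by omega
    simp only [e2]
    exact (ih i h1).trans (hp (i + m * w) (by omega))

lemma awin_dvd (s : List Char) (w : Nat) (hA : AWin s w) (hle : 2 * w ≤ s.length) :
    w ∣ s.length := by
  obtain ⟨hw, hch⟩ := hA
  by_contra hnd
  have hr0 : s.length % w ≠ 0 := fun h => hnd (Nat.dvd_of_mod_eq_zero h)
  have hdm := Nat.div_add_mod s.length w
  have hrw : s.length % w < w := Nat.mod_lt _ hw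
  have hlt : (s.length / w) * w < s.length := by rw [Nat.mul_comm]; omega
  have hchq := hch (s.length / w) hlt
  have hlen := congrArg List.length hchq
  simp only [List.length_take, List.length_drop] at hlen
  have h1 : s.length - (s.length / w) * w = s.length % w := by rw [Nat.mul_comm]; omega
  rw [h1] at hlen
  omega

lemma awin_per (s : List Char) (w : Nat) (hA : AWin s w) :
    Per s w := by
  obtain ⟨hw, hch⟩ := hA
  intro i h
  have hi := Nat.div_add_mod i w
  have hrw : i % w < w := Nat.mod_lt _ hw
  have hlt1 : (i / w) * w < s.length := by rw [Nat.mul_comm]; omega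
  have e : (i / w + 1) * w = (i / w) * w + w := by ring
  have hlt2 : (i / w + 1) * w < s.length := by rw [e, Nat.mul_comm (i / w) w]; omega
  have e1 := congrArg (fun l => l[i % w]?) (hch (i / w) hlt1)
  have e2 := congrArg (fun l => l[i % w]?) (hch (i / w + 1) hlt2)
  simp only [List.getElem?_take, List.getElem?_drop, if_pos hrw] at e1 e2
  have k1 : (i / w) * w + i % w = i := by rw [Nat.mul_comm]; omega
  have k2 : (i / w + 1) * w + i % w = i + w := by rw [e, Nat.mul_comm (i / w) w]; omega
  rw [k1] at e1
  rw [k2] at e2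
  have h12 : s[i]? = s[i + w]? := by rw [e1, ← e2]
  rw [List.getElem?_eq_getElem (by omega), List.getElem?_eq_getElem h] at h12
  exact Option.some.inj h12

lemma per_rot (s : List Char) (w : Nat) (hp : Per s w) (hd : w ∣ s.length) :
    s.rotate w = s := by
  rcases Nat.eq_zero_or_pos s.length with hn | hn
  · rw [List.length_eq_zero_iff.mp hn]
    simp
  · have hwle : w ≤ s.length := Nat.le_of_dvd hn hd
    rw [List.rotate_eq_drop_append_take hwle]
    obtain ⟨t, ht⟩ := hd
    have ht1 : 1 ≤ t := by
      rcases Nat.eq_zero_or_pos t with h0 | h1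
      · rw [h0, Nat.mul_zero] at ht; omega
      · exact h1
    have emul : w * t = w * (t - 1) + w := by
      have h' := Nat.mul_add w (t - 1) 1
      rw [show t - 1 + 1 = t from by omega] at h'
      omega
    have hnw : s.length - w = w * (t - 1) := by omega
    apply List.ext_getElem
    · simp only [List.length_append, List.length_drop, List.length_take]
      omega
    · intro j h1 h2
      rw [List.getElem_append]
      split
      · next hj =>
        rw [List.getElem_drop]
        simp only [List.length_drop] at hj
        have e : w + j = j + w := Nat.add_comm w j
        simp only [e]
        exact (hp j (by omega)).symm
      · next hj =>
        rw [List.getElem_take]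
        simp only [List.length_drop] at hj ⊢
        rw [not_lt] at hj
        have hmul : (t - 1) * w = s.length - w := by rw [Nat.mul_comm]; omega
        have hjlt : (j - (s.length - w)) + (t - 1) * w < s.length := by rw [hmul]; omega
        have := per_iterate s w hp (t - 1) (j - (s.length - w)) hjlt
        have e3 : (j - (s.length - w)) + (t - 1) * w = j := by rw [hmul]; omega
        simp only [e3] at this
        exact this

lemma rot_per (s : List Char) (w : Nat) (hr : s.rotate w = s) (hle : w ≤ s.length) :
    Per s w := by
  intro i h
  have hd : s.drop w ++ s.take w = s := by rw [← List.rotate_eq_drop_append_take hle, hr]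
  have h12 := congrArg (fun l => l[i]?) hd
  simp only at h12
  rw [List.getElem?_append_left (by simp only [List.length_drop]; omega),
    List.getElem?_drop] at h12
  rw [List.getElem?_eq_getElem (by omega), List.getElem?_eq_getElem (by omega)] at h12
  have h2 := Option.some.inj h12
  have e : w + i = i + w := Nat.add_comm w i
  simp only [e] at h2
  exact h2.symm

lemma per_awin (s : List Char) (w : Nat) (hp : Per s w) (hd : w ∣ s.length) (hw : 0 < w) :
    AWin s w := by
  refine ⟨hw, ?_⟩
  intro m hm
  obtain ⟨t, ht⟩ := hd
  have hmt : m < t := by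
    by_contra hle'
    rw [not_lt] at hle'
    have h1 : w * t ≤ w * m := Nat.mul_le_mul_left w hle'
    have h2 : w * m = m * w := Nat.mul_comm w m
    omega
  have hmw : m * w + w ≤ s.length := by
    have h1 : (m + 1) * w ≤ t * w := Nat.mul_le_mul_right w (by omega)
    have h2 : (m + 1) * w = m * w + w := by ring
    have h3 : t * w = w * t := Nat.mul_comm t w
    omega
  apply List.ext_getElem
  · simp only [List.length_take, List.length_drop]
    omega
  · intro r h1 h2
    rw [List.getElem_take, List.getElem_drop, List.getElem_take]
    have hr : r < w := by simp only [List.length_take, List.length_drop] at h1; omega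
    have hpi := per_iterate s w hp m r (by omega)
    have e : r + m * w = m * w + r := Nat.add_comm r (m * w)
    simp only [e] at hpi
    exact hpi.symm

lemma rotate_iterate (l : List Char) (m : Nat) :
    (fun t : List Char => t.rotate 1)^[m] l = l.rotate m := by
  induction m with
  | zero => simp
  | succ m ih => rw [Function.iterate_succ_apply', ih]; simp [List.rotate_rotate]

lemma rot_gcd (s : List Char) (k : Nat) (hr : s.rotate k = s) :
    s.rotate (Nat.gcd k s.length) = s := by
  have h1 : Function.IsPeriodicPt (fun t : List Char => t.rotate 1) k s := by
    show (fun t : List Char => t.rotate 1)^[k] s = s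
    rw [rotate_iterate]; exact hr
  have h2 : Function.IsPeriodicPt (fun t : List Char => t.rotate 1) s.length s := by
    show (fun t : List Char => t.rotate 1)^[s.length] s = s
    rw [rotate_iterate]; exact List.rotate_length s
  have h3 : (fun t : List Char => t.rotate 1)^[Nat.gcd k s.length] s = s := h1.gcd h2
  rwa [rotate_iterate] at h3

-- a length-n window of s++s at offset k ≤ n is the rotation by k
lemma window_rotate (s : List Char) (k : Nat) (hk : k ≤ s.length) :
    ((s ++ s).drop k).take s.length = s.rotate k := by
  rw [List.rotate_eq_drop_append_take hk, List.drop_append_of_le_length hk, List.take_append]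
  congr 1
  · exact List.take_of_length_le (by simp only [List.length_drop]; omega)
  · congr 1
    simp only [List.length_drop]
    omega

-- B's haystack (s+s)[1:-1] as drop/take
lemma slice_haystack (s : List Char) (hs : s ≠ []) :
    PySem.List.slice (s ++ s) (some 1) (some (-1))
      = ((s ++ s).drop 1).take (2 * s.length - 2) := by
  have hn : 0 < s.length := List.length_pos_iff.mpr hs
  simp only [PySem.List.slice, PySem.List.clampIdx_neg_one]
  rw [show (1 : Int) = ((1 : Nat) : Int) from rfl, PySem.List.clampIdx_natCast]
  rw [Nat.min_eq_left (by simp only [List.length_append]; omega)]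
  congr 1
  simp only [List.length_append]
  omega

-- membership of s in (s+s)[1:-1] is a nontrivial self-rotation
lemma infix_iff_rot (s : List Char) (hs : s ≠ []) :
    (s <:+: ((s ++ s).drop 1).take (2 * s.length - 2))
      ↔ ∃ k : Nat, 1 ≤ k ∧ k ≤ s.length - 1 ∧ s.rotate k = s := by
  have hn : 0 < s.length := List.length_pos_iff.mpr hs
  have hlenT : (((s ++ s).drop 1).take (2 * s.length - 2)).length = 2 * s.length - 2 := by
    simp only [List.length_take, List.length_drop, List.length_append]
    omega
  constructor
  · rintro ⟨p, q, hT⟩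
    have hlen := congrArg List.length hT
    simp only [List.length_append, hlenT] at hlen
    have hj2 : p.length + s.length ≤ 2 * s.length - 2 := by omega
    have hcomp : ((((s ++ s).drop 1).take (2 * s.length - 2)).drop p.length).take s.length
        = s.rotate (p.length + 1) := by
      rw [List.drop_take, List.drop_drop, List.take_take,
        Nat.min_eq_left (by omega), Nat.add_comm 1 p.length]
      exact window_rotate s (p.length + 1) (by omega)
    have hdropT : (((s ++ s).drop 1).take (2 * s.length - 2)).drop p.length = s ++ q := by
      rw [← hT, List.append_assoc, List.drop_left]
    refine ⟨p.length + 1, by omega, by omega, ?_⟩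
    rw [← hcomp, hdropT]
    exact List.take_left' rfl
  · rintro ⟨k, hk1, hk2, hk⟩
    have hn2 : 2 ≤ s.length := by omega
    have hcomp : ((((s ++ s).drop 1).take (2 * s.length - 2)).drop (k - 1)).take s.length
        = s.rotate k := by
      rw [List.drop_take, List.drop_drop, List.take_take,
        Nat.min_eq_left (by omega), show 1 + (k - 1) = k from by omega]
      exact window_rotate s k (by omega)
    have hinf : ((((s ++ s).drop 1).take (2 * s.length - 2)).drop (k - 1)).take s.length
        <:+: ((s ++ s).drop 1).take (2 * s.length - 2) :=
      ((List.take_prefix _ _).isInfix).trans ((List.drop_suffix _ _).isInfix)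
    rw [hcomp, hk] at hinf
    exact hinf

-- A's result is "some nontrivial self-rotation fixes s"
lemma A_iff_rot (s : List Char) :
    outerA s (s.length : Int) (PySem.Int.floordiv (s.length : Int) 2) = true
      ↔ ∃ k : Nat, 1 ≤ k ∧ k ≤ s.length - 1 ∧ s.rotate k = s := by
  have hfd : PySem.Int.floordiv (s.length : Int) 2 = ((s.length / 2 : Nat) : Int) := by
    exact_mod_cast PySem.Int.floordiv_natCast s.length 2
  rw [hfd, outerA_iff]
  constructor
  · rintro ⟨w, hw1, hw2, hC⟩
    have hwn : w = ((w.toNat : Nat) : Int) := by omega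
    rw [hwn] at hC hw2
    have hwpos : 0 < w.toNat := by omega
    have hA : AWin s w.toNat := ⟨hwpos, (chunk_nat s w.toNat).mp hC⟩
    have hle : 2 * w.toNat ≤ s.length := by
      have h2 : w.toNat ≤ s.length / 2 := by exact_mod_cast hw2
      omega
    have hd := awin_dvd s w.toNat hA hle
    have hper := awin_per s w.toNat hA
    exact ⟨w.toNat, hwpos, by omega, per_rot s w.toNat hper hd⟩
  · rintro ⟨k, hk1, hk2, hk⟩
    have hn2 : 2 ≤ s.length := by omega
    have hrd := rot_gcd s k hk
    have hdvd : Nat.gcd k s.length ∣ s.length := Nat.gcd_dvd_right k s.length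
    have hdpos : 0 < Nat.gcd k s.length := Nat.gcd_pos_of_pos_left s.length (by omega)
    have hdk : Nat.gcd k s.length ≤ k := Nat.gcd_le_left s.length (by omega)
    have h2d : 2 * Nat.gcd k s.length ≤ s.length := by
      obtain ⟨t, ht⟩ := hdvd
      have ht2 : 2 ≤ t := by
        by_contra hlt'
        rw [not_le] at hlt'
        have : t = 0 ∨ t = 1 := by omega
        rcases this with h0 | h1
        · rw [h0, Nat.mul_zero] at ht; omega
        · rw [h1, Nat.mul_one] at ht; omega
      have h1 : 2 * Nat.gcd k s.length ≤ t * Nat.gcd k s.length :=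
        Nat.mul_le_mul_right _ ht2
      have h2 : t * Nat.gcd k s.length = Nat.gcd k s.length * t := Nat.mul_comm _ _
      omega
    have hper := rot_per s (Nat.gcd k s.length) hrd (by omega)
    have hA := per_awin s (Nat.gcd k s.length) hper hdvd hdpos
    refine ⟨(Nat.gcd k s.length : Int), by exact_mod_cast hdpos, ?_,
      (chunk_nat s (Nat.gcd k s.length)).mpr hA.2⟩
    have hhalf : Nat.gcd k s.length ≤ s.length / 2 := by omega
    exact_mod_cast hhalf

lemma B_iff_rot (s : List Char) (hs : s ≠ []) :
    PySem.Chars.isIn s (PySem.List.slice (s ++ s) (some 1) (some (-1))) = true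
      ↔ ∃ k : Nat, 1 ≤ k ∧ k ≤ s.length - 1 ∧ s.rotate k = s := by
  rw [slice_haystack s hs, PySem.Chars.isIn_iff_infix, infix_iff_rot s hs]

-- ===== VERDICT (by name: the statement is the Claim_ definition above) =====
theorem is_invalid_2_spec : Claim_equal_is_invalid_2 := by
  intro num _
  unfold Spec_is_invalid_2 is_invalid_2 is_invalid_2_alt
  have hA := A_iff_rot (PySem.Int.toChars num)
  have hB := B_iff_rot (PySem.Int.toChars num) (toChars_ne_nil num)
  rcases h1 : outerA (PySem.Int.toChars num) ((PySem.Int.toChars num).length : Int)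
      (PySem.Int.floordiv ((PySem.Int.toChars num).length : Int) 2) with _ | _
  · rcases h2 : PySem.Chars.isIn (PySem.Int.toChars num)
        (PySem.List.slice (PySem.Int.toChars num ++ PySem.Int.toChars num) (some 1) (some (-1))) with _ | _
    · rfl
    · exact absurd (h1 ▸ hA.mpr (hB.mp h2)) (by simp)
  · exact (hB.mpr (hA.mp h1)).symm
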